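-- pv_equiv track=rewrite | github.com/DanEEStar/adventofcode | 2015/day5/day5_2.py | prefix_count_dict
-- ===== SOURCE A (Python) =====
-- from collections import defaultdict
--
-- def three_substrings(s):
--     return [s[i:i+3] for i in range(0, len(s))]
--
-- def prefix_count_dict(s):
--     d = defaultdict(int)
--     triplets = three_substrings(s)
--
--     for triplet in triplets:
--         if len(triplet) == 3:
--             if triplet[0:2] != triplet[1:3]:
--                 d[triplet[0:2]] += 1
--         elif len(triplet) == 2:
--             d[triplet[0:2]] += 1
--
--     return d
-- ===== SOURCE B (Python) =====
-- from collections import defaultdict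
--
-- def prefix_count_dict(s):
--     d = defaultdict(int)
--     for i in range(len(s) - 1):
--         d[s[i:i+2]] += 1
--     for i in range(len(s) - 2):
--         if s[i] == s[i+1] == s[i+2]:
--             d[s[i:i+2]] -= 1
--     return d
-- ===== Notes on version B (the rewrite author's own statement) =====
-- stated objective: alternative
-- what changed: B counts every adjacent 2-char pair in one unconditional pass and then, in a second pass, subtracts one for each position starting a run of three equal characters, instead of A's single pass over 3-char slices with a conditional increment.
import Mathlib
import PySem

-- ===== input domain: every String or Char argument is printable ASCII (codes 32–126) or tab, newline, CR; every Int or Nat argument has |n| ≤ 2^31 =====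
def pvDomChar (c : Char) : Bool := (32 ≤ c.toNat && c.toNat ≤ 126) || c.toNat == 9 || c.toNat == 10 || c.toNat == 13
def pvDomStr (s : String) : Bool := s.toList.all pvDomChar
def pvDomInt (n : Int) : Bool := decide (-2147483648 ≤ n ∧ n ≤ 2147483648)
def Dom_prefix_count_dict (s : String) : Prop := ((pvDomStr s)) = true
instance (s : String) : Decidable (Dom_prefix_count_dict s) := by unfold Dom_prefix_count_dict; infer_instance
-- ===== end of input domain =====

-- B replaces A's single conditional pass over 3-char slices by an alternative two-pass
-- decomposition: count every adjacent pair unconditionally, then subtract one per triple-run start.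


-- ===== PORT A =====
def three_substrings (s : String) : List String :=
  (PySem.List.pyRange 0 (PySem.Str.len s) 1).map (fun i => PySem.Str.slice s (some i) (some (i + 3)))

def prefix_count_dict (s : String) : List (String × Int) :=
  let d : PySem.Dict String Int := PySem.Dict.empty
  let triplets := three_substrings s
  let d := triplets.foldl (fun d triplet =>
    if PySem.Str.len triplet = 3 then
      if PySem.Str.slice triplet (some 0) (some 2) ≠ PySem.Str.slice triplet (some 1) (some 3) then
        d.modify (PySem.Str.slice triplet (some 0) (some 2)) 0 (· + 1)
      else d
    else if PySem.Str.len triplet = 2 then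
      d.modify (PySem.Str.slice triplet (some 0) (some 2)) 0 (· + 1)
    else d) d
  d.items

-- ===== PORT B =====
def prefix_count_dict_alt (s : String) : List (String × Int) :=
  let d : PySem.Dict String Int := PySem.Dict.empty
  let d := (PySem.List.pyRange 0 (PySem.Str.len s - 1) 1).foldl
    (fun d i => d.modify (PySem.Str.slice s (some i) (some (i + 2))) 0 (· + 1)) d
  let d := (PySem.List.pyRange 0 (PySem.Str.len s - 2) 1).foldl
    (fun d i =>
      if PySem.Str.pyGet? s i = PySem.Str.pyGet? s (i + 1) ∧
         PySem.Str.pyGet? s (i + 1) = PySem.Str.pyGet? s (i + 2) then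
        d.modify (PySem.Str.slice s (some i) (some (i + 2))) 0 (· - 1)
      else d) d
  d.items


-- ===== PRECONDITION & SPEC =====
def Spec_prefix_count_dict (s : String) (out : List (String × Int)) : Prop := out = prefix_count_dict_alt s
instance (s : String) (out : List (String × Int)) : Decidable (Spec_prefix_count_dict s out) := by unfold Spec_prefix_count_dict; infer_instance

-- ===== CLAIM (what is proved, stated in full; the proofs are below) =====
def Claim_equal_prefix_count_dict : Prop := ∀ (s : String), Dom_prefix_count_dict s → Spec_prefix_count_dict s (prefix_count_dict s)

-- ===== LEMMAS AND PROOFS =====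

def pvPair (s : String) (j : Nat) : String :=
  PySem.Str.slice s (some (j : Int)) (some ((j : Int) + 2))
def pvTriple (cs : List Char) (j : Nat) : Bool :=
  decide (j + 2 < cs.length) && (cs[j]? == cs[j + 1]?) && (cs[j + 1]? == cs[j + 2]?)
def pvLA (s : String) : List String :=
  ((List.range (s.toList.length - 1)).filter (fun j => !pvTriple s.toList j)).map (pvPair s)
def pvLall (s : String) : List String :=
  (List.range (s.toList.length - 1)).map (pvPair s)
def pvLT (s : String) : List String :=
  ((List.range (s.toList.length - 2)).filter (pvTriple s.toList)).map (pvPair s)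
def pvInc (d : PySem.Dict String Int) (k : String) : PySem.Dict String Int := d.modify k 0 (· + 1)
def pvDec (d : PySem.Dict String Int) (k : String) : PySem.Dict String Int := d.modify k 0 (· - 1)

theorem pv_foldl_if_filter_map {α β γ : Type} (g : γ → β → γ) (p : α → Bool) (f : α → β)
    (l : List α) (d : γ) :
    List.foldl (fun d j => if p j then g d (f j) else d) d l
      = List.foldl g d ((l.filter p).map f) := by
  induction l generalizing d with
  | nil => rfl
  | cons a l ih =>
    simp only [List.foldl_cons]
    by_cases h : p a = true
    · rw [List.filter_cons_of_pos h]
      simp only [h, if_true, List.map_cons, List.foldl_cons]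
      exact ih _
    · rw [List.filter_cons_of_neg (by simp [h])]
      simp only [h]
      exact ih d

theorem pv_pair_toList (s : String) (j : Nat) :
    (pvPair s j).toList = (s.toList.drop j).take 2 := by
  have h2 : ((j : Int) + 2) = ((j + 2 : Nat) : Int) := by push_cast; ring
  rw [pvPair, PySem.Str.toList_slice, PySem.Chars.slice_eq_listSlice, h2,
    PySem.List.slice_natCast]
  congr 1
  omega

theorem pv_take2_drop (cs : List Char) (j : Nat) (h : j + 1 < cs.length) :
    (cs.drop j).take 2 = [cs[j], cs[j + 1]] := by
  have e1 : List.drop j cs = cs[j] :: cs[j + 1] :: List.drop (j + 1 + 1) cs := by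
    rw [List.drop_eq_getElem_cons (show j < cs.length by omega), List.drop_eq_getElem_cons h]
  rw [e1, List.take_succ_cons, List.take_succ_cons, List.take_zero]

theorem pv_triple_eq (s : String) (j : Nat) (h : j + 2 < s.toList.length) :
    pvTriple s.toList j
      = (decide (s.toList[j] = s.toList[j + 1]) && decide (s.toList[j + 1] = s.toList[j + 2])) := by
  unfold pvTriple
  rw [List.getElem?_eq_getElem (show j < s.toList.length by omega),
    List.getElem?_eq_getElem (show j + 1 < s.toList.length by omega),
    List.getElem?_eq_getElem h]
  have h' : j + 2 < s.length := by simpa [← String.length_toList] using h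
  simp [h', beq_eq_decide]

theorem pv_pair_eq_iff (s : String) (j : Nat) (h : j + 2 < s.toList.length) :
    (pvPair s j = pvPair s (j + 1)) ↔ pvTriple s.toList j = true := by
  rw [pv_triple_eq s j h]
  constructor
  · intro he
    have := congrArg String.toList he
    rw [pv_pair_toList, pv_pair_toList, pv_take2_drop _ _ (by omega),
      pv_take2_drop _ _ (by omega)] at this
    simp only [List.cons.injEq, and_true] at this
    simp [this.1, this.2]
  · intro ht
    simp only [Bool.and_eq_true, decide_eq_true_eq] at ht
    apply String.ext
    rw [pv_pair_toList, pv_pair_toList, pv_take2_drop _ _ (by omega),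
      pv_take2_drop _ _ (by omega)]
    simp [ht.1, ht.2]

theorem pv_lslice02 (xs : List Char) : PySem.List.slice xs (some 0) (some 2) = xs.take 2 := by
  have h := PySem.List.slice_natCast xs 0 2
  norm_num at h
  simpa using h

theorem pv_lslice13 (xs : List Char) :
    PySem.List.slice xs (some 1) (some 3) = (xs.drop 1).take 2 := by
  have h := PySem.List.slice_natCast xs 1 3
  norm_num at h
  simpa using h

theorem pv_slice02 (s : String) (j : Nat) :
    PySem.Str.slice (PySem.Str.slice s (some (j:Int)) (some ((j:Int) + 3))) (some 0) (some 2)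
      = pvPair s j := by
  apply String.ext
  have h3 : ((j : Int) + 3) = ((j + 3 : Nat) : Int) := by push_cast; ring
  rw [PySem.Str.toList_slice, PySem.Chars.slice_eq_listSlice, pv_lslice02,
    PySem.Str.toList_slice, PySem.Chars.slice_eq_listSlice, h3, PySem.List.slice_natCast,
    pv_pair_toList, List.take_take]
  congr 1
  omega

theorem pv_slice13 (s : String) (j : Nat) :
    PySem.Str.slice (PySem.Str.slice s (some (j:Int)) (some ((j:Int) + 3))) (some 1) (some 3)
      = pvPair s (j + 1) := by
  apply String.ext
  have h3 : ((j : Int) + 3) = ((j + 3 : Nat) : Int) := by push_cast; ring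
  rw [PySem.Str.toList_slice, PySem.Chars.slice_eq_listSlice, pv_lslice13,
    PySem.Str.toList_slice, PySem.Chars.slice_eq_listSlice, h3, PySem.List.slice_natCast,
    pv_pair_toList, List.drop_take, List.drop_drop, List.take_take]
  congr 2
  omega

theorem pv_len_slice3 (s : String) (j : Nat) :
    PySem.Str.len (PySem.Str.slice s (some (j:Int)) (some ((j:Int) + 3)))
      = ((min 3 (s.toList.length - j) : Nat) : Int) := by
  have h3 : ((j : Int) + 3) = ((j + 3 : Nat) : Int) := by push_cast; ring
  rw [PySem.Str.len_eq, PySem.Str.toList_slice, PySem.Chars.slice_eq_listSlice, h3,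
    PySem.List.slice_natCast]
  simp

theorem pv_portA (s : String) :
    prefix_count_dict s = (List.foldl pvInc PySem.Dict.empty (pvLA s)).items := by
  unfold prefix_count_dict three_substrings
  rw [PySem.Str.len_eq, PySem.List.pyRange_zero_natCast]
  dsimp only
  rw [List.foldl_map, List.foldl_map]
  rw [PySem.List.foldl_congr_mem _ _
    (fun d j => if (decide (j + 2 ≤ s.toList.length) && !pvTriple s.toList j) then
        pvInc d (pvPair s j) else d) _ ?_]
  · rw [pv_foldl_if_filter_map]
    have hfilt : (List.range s.toList.length).filter
          (fun j => decide (j + 2 ≤ s.toList.length) && !pvTriple s.toList j)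
        = (List.range (s.toList.length - 1)).filter (fun j => !pvTriple s.toList j) := by
      cases hn : s.toList.length with
      | zero => rfl
      | succ m =>
        have : List.range (m + 1) = List.range m ++ [m] := List.range_succ
        rw [this, List.filter_append]
        have hm : (List.filter (fun j => decide (j + 2 ≤ m + 1) && !pvTriple s.toList j) [m]) = [] := by
          simp
        rw [hm, List.append_nil]
        have : m + 1 - 1 = m := by omega
        rw [this]
        apply List.filter_congr
        intro j hj
        rw [List.mem_range] at hj
        simp [show j + 2 ≤ m + 1 by omega]
    rw [hfilt]
    rfl
  · intro d j hj
    rw [List.mem_range] at hj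
    by_cases h3 : j + 3 ≤ s.toList.length
    · have hlen : PySem.Str.len (PySem.Str.slice s (some (j:Int)) (some ((j:Int) + 3))) = 3 := by
        rw [pv_len_slice3]
        have : min 3 (s.toList.length - j) = 3 := by omega
        rw [this]; rfl
      rw [if_pos hlen, pv_slice02, pv_slice13]
      by_cases ht : pvTriple s.toList j = true
      · have hne : ¬ pvPair s j ≠ pvPair s (j + 1) := by
          simpa using (pv_pair_eq_iff s j (by omega)).2 ht
        rw [if_neg hne]
        simp [ht]
      · have hne : pvPair s j ≠ pvPair s (j + 1) :=
          fun he => ht ((pv_pair_eq_iff s j (by omega)).1 he)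
        rw [if_pos hne]
        simp only [Bool.not_eq_true] at ht
        have hls : s.toList.length = s.length := String.length_toList
        simp [pvInc, ht, show j + 2 ≤ s.length by omega]
    · by_cases h2 : j + 2 ≤ s.toList.length
      · have hlen3 : ¬ PySem.Str.len (PySem.Str.slice s (some (j:Int)) (some ((j:Int) + 3))) = 3 := by
          rw [pv_len_slice3]
          have : min 3 (s.toList.length - j) = 2 := by omega
          rw [this]; decide
        have hlen2 : PySem.Str.len (PySem.Str.slice s (some (j:Int)) (some ((j:Int) + 3))) = 2 := by
          rw [pv_len_slice3]
          have : min 3 (s.toList.length - j) = 2 := by omega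
          rw [this]; rfl
        rw [if_neg hlen3, if_pos hlen2, pv_slice02]
        have ht : pvTriple s.toList j = false := by
          unfold pvTriple
          rw [decide_eq_false (by omega : ¬ (j + 2 < s.toList.length))]
          simp
        have hls : s.toList.length = s.length := String.length_toList
        simp [pvInc, ht, show j + 2 ≤ s.length by omega]
      · have hlen3 : ¬ PySem.Str.len (PySem.Str.slice s (some (j:Int)) (some ((j:Int) + 3))) = 3 := by
          rw [pv_len_slice3]
          have : min 3 (s.toList.length - j) = 1 := by omega
          rw [this]; decide
        have hlen2 : ¬ PySem.Str.len (PySem.Str.slice s (some (j:Int)) (some ((j:Int) + 3))) = 2 := by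
          rw [pv_len_slice3]
          have : min 3 (s.toList.length - j) = 1 := by omega
          rw [this]; decide
        rw [if_neg hlen3, if_neg hlen2]
        have hls : s.toList.length = s.length := String.length_toList
        simp [show ¬ (j + 2 ≤ s.length) by omega]

theorem pv_pyRange_sub1 (n : Nat) :
    PySem.List.pyRange 0 ((n:Int) - 1) 1 = (List.range (n - 1)).map (fun (k : Nat) => (k:Int)) := by
  cases n with
  | zero => rfl
  | succ m =>
    have h : ((m + 1 : Nat) : Int) - 1 = ((m : Nat) : Int) := by push_cast; ring
    simp only [Nat.add_sub_cancel]
    rw [h, PySem.List.pyRange_zero_natCast]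

theorem pv_pyRange_sub2 (n : Nat) :
    PySem.List.pyRange 0 ((n:Int) - 2) 1 = (List.range (n - 2)).map (fun (k : Nat) => (k:Int)) := by
  match n with
  | 0 => rfl
  | 1 => rfl
  | (m+2) =>
    have h : ((m + 2 : Nat) : Int) - 2 = ((m : Nat) : Int) := by push_cast; ring
    simp only [Nat.add_sub_cancel]
    rw [h, PySem.List.pyRange_zero_natCast]

theorem pv_portB (s : String) :
    prefix_count_dict_alt s
      = (List.foldl pvDec (List.foldl pvInc PySem.Dict.empty (pvLall s)) (pvLT s)).items := by
  unfold prefix_count_dict_alt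
  rw [PySem.Str.len_eq, pv_pyRange_sub1, pv_pyRange_sub2]
  dsimp only
  rw [List.foldl_map, List.foldl_map]
  have e1 : List.foldl
      (fun d (k : Nat) => d.modify (PySem.Str.slice s (some (k:Int)) (some ((k:Int) + 2))) 0 (· + 1))
      PySem.Dict.empty (List.range (s.toList.length - 1))
      = List.foldl pvInc PySem.Dict.empty (pvLall s) := by
    unfold pvLall
    rw [List.foldl_map]
    rfl
  rw [e1]
  rw [PySem.List.foldl_congr_mem _ _
    (fun d k => if pvTriple s.toList k then pvDec d (pvPair s k) else d) _ ?_]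
  · rw [pv_foldl_if_filter_map]
    rfl
  · intro d k hk
    rw [List.mem_range] at hk
    have hk2 : k + 2 < s.toList.length := by omega
    have hiff : (PySem.Str.pyGet? s (k:Int) = PySem.Str.pyGet? s ((k:Int) + 1) ∧
        PySem.Str.pyGet? s ((k:Int) + 1) = PySem.Str.pyGet? s ((k:Int) + 2))
        ↔ pvTriple s.toList k = true := by
      rw [show ((k:Int) + 1) = ((k + 1 : Nat) : Int) by push_cast; ring,
        show ((k:Int) + 2) = ((k + 2 : Nat) : Int) by push_cast; ring]
      simp only [PySem.Str.pyGet?_natCast]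
      unfold pvTriple
      rw [decide_eq_true hk2]
      simp [beq_iff_eq]
    by_cases hc : (PySem.Str.pyGet? s (k:Int) = PySem.Str.pyGet? s ((k:Int) + 1) ∧
        PySem.Str.pyGet? s ((k:Int) + 1) = PySem.Str.pyGet? s ((k:Int) + 2))
    · rw [if_pos hc]
      have ht := hiff.1 hc
      simp only [ht, if_true]
      rfl
    · rw [if_neg hc]
      have ht : pvTriple s.toList k = false := by
        rcases Bool.eq_false_or_eq_true (pvTriple s.toList k) with h | h
        · exact absurd (hiff.2 h) hc
        · exact h
      simp [ht]

theorem pv_getD_foldl_sub (l : List String) (d : PySem.Dict String Int) (v : String) :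
    (List.foldl pvDec d l).getD v 0 = d.getD v 0 - (l.count v : Int) := by
  induction l generalizing d with
  | nil => simp
  | cons x l ih =>
    simp only [List.foldl_cons, ih, pvDec, PySem.Dict.getD_modify, List.count_cons]
    by_cases h : v = x
    · simp only [h, beq_self_eq_true, if_true]
      push_cast; ring
    · have hx : (x == v) = false := by simp [Ne.symm h]
      simp [h, hx]

theorem pv_set_fold_filter {α : Type} [BEq α] [LawfulBEq α] (ps : List (α × Bool))
    (hsucc : ∀ i (h : i < ps.length), (ps[i]).2 = true →
      ∃ h2 : i + 1 < ps.length, (ps[i + 1]).1 = (ps[i]).1)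
    (acc : PySem.Set α) :
    List.foldl PySem.Set.add acc ((ps.filter (fun x => !x.2)).map (·.1))
      = List.foldl PySem.Set.add acc (ps.map (·.1)) := by
  induction ps generalizing acc with
  | nil => rfl
  | cons a rest ih =>
    have hrest : ∀ i (h : i < rest.length), (rest[i]).2 = true →
        ∃ h2 : i + 1 < rest.length, (rest[i + 1]).1 = (rest[i]).1 := by
      intro i h hf
      have := hsucc (i + 1) (by simpa using Nat.succ_lt_succ h) (by simpa using hf)
      obtain ⟨h2, he⟩ := this
      exact ⟨by simpa using Nat.lt_of_succ_lt_succ h2, by simpa using he⟩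
    by_cases hfa : a.2 = true
    · obtain ⟨h2, he⟩ := hsucc 0 (by simp) (by simpa using hfa)
      obtain ⟨b, rest', rfl⟩ : ∃ b rest', rest = b :: rest' := by
        cases rest with
        | nil => simp at h2
        | cons b r => exact ⟨b, r, rfl⟩
      have hb : b.1 = a.1 := by simpa using he
      rw [List.filter_cons_of_neg (by simp [hfa]), ih hrest acc]
      simp only [List.map_cons, List.foldl_cons, hb]
      rw [PySem.Set.add_of_mem ((PySem.Set.mem_add acc a.1 a.1).2 (Or.inr rfl))]
    · rw [List.filter_cons_of_pos (by simp [hfa])]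
      simp only [List.map_cons, List.foldl_cons]
      exact ih hrest _

theorem pv_triple_succ (s : String) (i : Nat) (h : pvTriple s.toList i = true) :
    i + 2 < s.toList.length ∧ pvPair s (i + 1) = pvPair s i := by
  have h2 : i + 2 < s.toList.length := by
    by_contra hnot
    unfold pvTriple at h
    rw [decide_eq_false hnot] at h
    simp at h
  exact ⟨h2, ((pv_pair_eq_iff s i h2).2 h).symm⟩

theorem pv_ofList_LA (s : String) : PySem.Set.ofList (pvLA s) = PySem.Set.ofList (pvLall s) := by
  set ps : List (String × Bool) :=
    (List.range (s.toList.length - 1)).map (fun j => (pvPair s j, pvTriple s.toList j)) with hps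
  have hLA : pvLA s = (ps.filter (fun x => !x.2)).map (·.1) := by
    rw [hps, List.filter_map, List.map_map]
    rfl
  have hLall : pvLall s = ps.map (·.1) := by
    rw [hps, List.map_map]
    rfl
  rw [hLA, hLall, PySem.Set.ofList_eq_foldl, PySem.Set.ofList_eq_foldl]
  apply pv_set_fold_filter
  intro i hi hfi
  simp only [hps, List.length_map, List.length_range] at hi
  have hei : ps[i] = (pvPair s i, pvTriple s.toList i) := by
    simp [hps]
  rw [hei] at hfi
  have := pv_triple_succ s i hfi
  have hi1 : i + 1 < ps.length := by
    simp only [hps, List.length_map, List.length_range]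
    omega
  refine ⟨hi1, ?_⟩
  have hei1 : ps[i + 1] = (pvPair s (i + 1), pvTriple s.toList (i + 1)) := by
    simp [hps]
  rw [hei, hei1]
  exact this.2

theorem pv_count (s : String) (k : String) :
    (pvLall s).count k = (pvLA s).count k + (pvLT s).count k := by
  unfold pvLall pvLA pvLT
  have hrange : (List.range (s.toList.length - 2)).filter (pvTriple s.toList)
      = (List.range (s.toList.length - 1)).filter (pvTriple s.toList) := by
    rcases Nat.lt_or_ge s.toList.length 2 with h | h
    · have : s.toList.length - 1 = s.toList.length - 2 := by omega
      rw [this]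
    · have h1 : s.toList.length - 1 = (s.toList.length - 2) + 1 := by omega
      rw [h1, List.range_succ, List.filter_append]
      have ht : pvTriple s.toList (s.toList.length - 2) = false := by
        unfold pvTriple
        rw [decide_eq_false (by omega : ¬ (s.toList.length - 2 + 2 < s.toList.length))]
        simp
      simp only [List.filter_cons, List.filter_nil, ht, Bool.false_eq_true, if_false,
        List.append_nil]
  rw [hrange]
  simp only [List.count_eq_countP, List.countP_map]
  have hperm := (List.filter_append_perm (pvTriple s.toList)
    (List.range (s.toList.length - 1))).countP_eq ((fun x => x == k) ∘ pvPair s)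
  rw [← hperm, List.countP_append]
  omega

theorem pv_getD_inc (l : List String) (k : String) :
    (List.foldl pvInc PySem.Dict.empty l).getD k 0 = (l.count k : Int) := by
  have eInc : List.foldl pvInc
      = List.foldl (fun (d : PySem.Dict String Int) (x : String) => d.modify x 0 (· + 1)) := rfl
  rw [eInc, PySem.Dict.getD_foldl_modify_add_one, PySem.Dict.getD_empty]
  ring

theorem pv_main (s : String) : prefix_count_dict s = prefix_count_dict_alt s := by
  rw [pv_portA, pv_portB]
  have eInc : List.foldl pvInc
      = List.foldl (fun (d : PySem.Dict String Int) (x : String) => d.modify x 0 (· + 1)) := rfl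
  have eDec : List.foldl pvDec
      = List.foldl (fun (d : PySem.Dict String Int) (x : String) => d.modify x 0 (· - 1)) := rfl
  have ndA : (List.foldl pvInc PySem.Dict.empty (pvLA s)).keys.Nodup := by
    rw [eInc]
    exact PySem.Dict.nodup_keys_foldl_modify_key _ (fun y => y) _ (fun _ _ v => v + 1) _ (by simp)
  have ndB : (List.foldl pvDec (List.foldl pvInc PySem.Dict.empty (pvLall s)) (pvLT s)).keys.Nodup := by
    rw [eDec, eInc]
    apply PySem.Dict.nodup_keys_foldl_modify_key _ (fun y => y) _ (fun _ _ v => v - 1)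
    exact PySem.Dict.nodup_keys_foldl_modify_key _ (fun y => y) _ (fun _ _ v => v + 1) _ (by simp)
  have hkA : (List.foldl pvInc PySem.Dict.empty (pvLA s)).keys = PySem.Set.ofList (pvLA s) := by
    rw [eInc, PySem.Dict.keys_foldl_modify, PySem.Dict.keys_empty, PySem.Set.update_nil_left]
  have hkB1 : (List.foldl pvInc PySem.Dict.empty (pvLall s)).keys = PySem.Set.ofList (pvLall s) := by
    rw [eInc, PySem.Dict.keys_foldl_modify, PySem.Dict.keys_empty, PySem.Set.update_nil_left]
  have hkB : (List.foldl pvDec (List.foldl pvInc PySem.Dict.empty (pvLall s)) (pvLT s)).keys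
      = PySem.Set.ofList (pvLall s) := by
    rw [eDec, PySem.Dict.keys_foldl_modify, hkB1, PySem.Set.update_eq_append_filter]
    have : List.filter (fun y => !(PySem.Set.ofList (pvLall s)).contains y)
        (PySem.Set.ofList (pvLT s)) = [] := by
      rw [List.filter_eq_nil_iff]
      intro a ha
      have hmem : a ∈ pvLall s := by
        have : a ∈ pvLT s := (PySem.Set.mem_ofList _ _).1 ha
        unfold pvLT at this
        unfold pvLall
        obtain ⟨j, hj, rfl⟩ := List.mem_map.1 this
        have hj' := (List.mem_filter.1 hj).1
        rw [List.mem_range] at hj'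
        exact List.mem_map.2 ⟨j, List.mem_range.2 (by omega), rfl⟩
      simp [(PySem.Set.mem_ofList _ _).2 hmem]
    rw [this, List.append_nil]
  rw [PySem.Dict.items_eq_map_keys _ ndA (0 : Int),
    PySem.Dict.items_eq_map_keys _ ndB (0 : Int), hkA, hkB, pv_ofList_LA]
  apply List.map_congr_left
  intro k hk
  have hcnt := pv_count s k
  rw [pv_getD_inc, pv_getD_foldl_sub, pv_getD_inc, hcnt]
  congr 1
  push_cast
  ring

-- ===== VERDICT (by name: the statement is the Claim_ definition above) =====
theorem prefix_count_dict_spec : Claim_equal_prefix_count_dict := by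
  intro s _
  exact pv_main s
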